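-- pv_equiv track=rewrite | github.com/katamarina-ru/cozystack-website | hack/fetch_telemetry.py | clean_apps
-- ===== SOURCE A (Python) =====
-- ALIASES: dict[str, str] = {
--     # Managed applications (docs/v1.2/applications/_include/*)
--     "clickhouse": "ClickHouse",
--     "paxclickhouse": "ClickHouse",
--     "foundationdb": "FoundationDB",
--     "harbor": "Harbor",
--     "kafka": "Kafka",
--     "mariadb": "MariaDB",
--     "mongodb": "MongoDB",
--     "nats": "NATS",
--     "openbao": "OpenBAO",
--     "opensearch": "OpenSearch",
--     "postgres": "Postgres",
--     "postgresql": "Postgres",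
--     "paxpostgres": "Postgres",
--     "qdrant": "Qdrant",
--     "rabbitmq": "RabbitMQ",
--     "redis": "Redis",
--     "paxredis": "Redis",
--     "clearml": "ClearML",
--     # Services (docs/v1.2/operations/services/*)
--     "etcd": "Etcd",
--     "ingress": "Ingress",
--     "monitoring": "Monitoring",
--     "bucket": "Bucket",
--     "seaweedfs": "SeaweedFS",
--     "nfs": "NFS",
--     # Networking (docs/v1.2/networking/_include/*)
--     "httpcache": "HTTPCache",
--     "tcpbalancer": "TCPBalancer",
--     "virtualprivatecloud": "VirtualPrivateCloud",
--     "vpc": "VirtualPrivateCloud",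
--     "vpn": "VPN",
--     # Virtualization (docs/v1.2/virtualization/_include/*)
--     "vminstance": "VMInstance",
--     "paxvminstance": "VMInstance",
--     "vmdisk": "VMDisk",
--     # Managed Kubernetes
--     "kubernetes": "Kubernetes",
-- }
--
-- def normalize_key(raw: str) -> str:
--     return raw.lower().replace("-", "").replace("_", "")
--
-- def clean_apps(apps: dict[str, int]) -> list[dict[str, object]]:
--     """Filter, dedupe (max), drop zeros, sort desc by count."""
--     merged: dict[str, int] = {}
--     for raw_name, count in apps.items():
--         canonical = ALIASES.get(normalize_key(raw_name))
--         if not canonical: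
--             continue
--         if count > merged.get(canonical, 0):
--             merged[canonical] = count
--     non_zero = [(name, n) for name, n in merged.items() if n > 0]
--     non_zero.sort(key=lambda item: (-item[1], item[0].lower()))
--     return [{"name": name, "value": str(count)} for name, count in non_zero]
-- ===== SOURCE B (Python) =====
-- CANONICAL_KEYS: list[tuple[str, list[str]]] = [
--     ("ClickHouse", ["clickhouse", "paxclickhouse"]),
--     ("FoundationDB", ["foundationdb"]),
--     ("Harbor", ["harbor"]),
--     ("Kafka", ["kafka"]),
--     ("MariaDB", ["mariadb"]),
--     ("MongoDB", ["mongodb"]),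
--     ("NATS", ["nats"]),
--     ("OpenBAO", ["openbao"]),
--     ("OpenSearch", ["opensearch"]),
--     ("Postgres", ["postgres", "postgresql", "paxpostgres"]),
--     ("Qdrant", ["qdrant"]),
--     ("RabbitMQ", ["rabbitmq"]),
--     ("Redis", ["redis", "paxredis"]),
--     ("ClearML", ["clearml"]),
--     ("Etcd", ["etcd"]),
--     ("Ingress", ["ingress"]),
--     ("Monitoring", ["monitoring"]),
--     ("Bucket", ["bucket"]),
--     ("SeaweedFS", ["seaweedfs"]),
--     ("NFS", ["nfs"]),
--     ("HTTPCache", ["httpcache"]),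
--     ("TCPBalancer", ["tcpbalancer"]),
--     ("VirtualPrivateCloud", ["virtualprivatecloud", "vpc"]),
--     ("VPN", ["vpn"]),
--     ("VMInstance", ["vminstance", "paxvminstance"]),
--     ("VMDisk", ["vmdisk"]),
--     ("Kubernetes", ["kubernetes"]),
-- ]
--
--
-- def _canonical(raw: str):
--     key = raw.lower().replace("-", "").replace("_", "")
--     for canon, aliases in CANONICAL_KEYS:
--         if key in aliases:
--             return canon
--     return None
--
--
-- def clean_apps(apps: dict[str, int]) -> list[dict[str, object]]:
--     """Sort the positive aliased entries by (-count, canonical.lower()), then keep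
--     the first (= maximal) occurrence of each canonical name while walking the
--     sorted list; canonical lowercase names are distinct, so the kept order is
--     already the final one."""
--     ranked = sorted(
--         ((c, n) for raw, n in apps.items()
--          if n > 0 and (c := _canonical(raw)) is not None),
--         key=lambda p: (-p[1], p[0].lower()))
--     seen = set()
--     out = []
--     for canon, n in ranked:
--         if canon not in seen:
--             seen.add(canon)
--             out.append({"name": canon, "value": str(n)})
--     return out
-- ===== Notes on version B (the rewrite author's own statement) =====
-- stated objective: alternative
-- what changed: B replaces A's running-max dict merge plus final sort by a sort-first pipeline over an inverse canonical->aliases catalogue: it ranks all positive aliased entries by (-count, canonical.lower()) and then keeps the first (hence maximal) hit per canonical with a seen-set while emitting the output dicts directly; no merge dict and no second sort exist in B.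
import Mathlib
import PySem

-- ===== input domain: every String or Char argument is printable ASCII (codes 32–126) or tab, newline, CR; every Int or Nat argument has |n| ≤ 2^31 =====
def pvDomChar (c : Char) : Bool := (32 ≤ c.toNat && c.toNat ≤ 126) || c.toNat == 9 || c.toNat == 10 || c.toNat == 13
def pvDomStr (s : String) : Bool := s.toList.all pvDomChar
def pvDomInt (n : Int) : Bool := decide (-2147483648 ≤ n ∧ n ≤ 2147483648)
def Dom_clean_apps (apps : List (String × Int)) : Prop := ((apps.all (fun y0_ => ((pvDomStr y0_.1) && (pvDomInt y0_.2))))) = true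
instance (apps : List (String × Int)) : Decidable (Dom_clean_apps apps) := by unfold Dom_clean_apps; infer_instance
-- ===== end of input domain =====

-- B replaces A's running-max dict merge (plus final sort) by a sort-first pipeline over an
-- inverse canonical→aliases catalogue: rank the positive aliased entries by
-- (-count, canonical.lower()), then keep the first (= maximal) hit per canonical with a
-- seen-set, emitting the output rows directly (objective: alternative).
-- The input dict is modelled as an association list, read through PySem.Dict.ofList.

-- ===== PORT A =====
-- ALIASES (module constant of A)
def pvAliases : PySem.Dict String String := PySem.Dict.mk [
  ("clickhouse", "ClickHouse"), ("paxclickhouse", "ClickHouse"), ("foundationdb", "FoundationDB"),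
  ("harbor", "Harbor"), ("kafka", "Kafka"), ("mariadb", "MariaDB"), ("mongodb", "MongoDB"),
  ("nats", "NATS"), ("openbao", "OpenBAO"), ("opensearch", "OpenSearch"), ("postgres", "Postgres"),
  ("postgresql", "Postgres"), ("paxpostgres", "Postgres"), ("qdrant", "Qdrant"),
  ("rabbitmq", "RabbitMQ"), ("redis", "Redis"), ("paxredis", "Redis"), ("clearml", "ClearML"),
  ("etcd", "Etcd"), ("ingress", "Ingress"), ("monitoring", "Monitoring"), ("bucket", "Bucket"),
  ("seaweedfs", "SeaweedFS"), ("nfs", "NFS"), ("httpcache", "HTTPCache"),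
  ("tcpbalancer", "TCPBalancer"), ("virtualprivatecloud", "VirtualPrivateCloud"),
  ("vpc", "VirtualPrivateCloud"), ("vpn", "VPN"), ("vminstance", "VMInstance"),
  ("paxvminstance", "VMInstance"), ("vmdisk", "VMDisk"), ("kubernetes", "Kubernetes")]

-- normalize_key
def pvNormalize (raw : String) : String :=
  PySem.Str.replace (PySem.Str.replace (PySem.Str.lower raw) "-" "") "_" ""

-- ALIASES.get(normalize_key(raw))
def pvAlias (raw : String) : Option String := pvAliases.get? (pvNormalize raw)

-- sort key 'lambda item: (-item[1], item[0].lower())' — a Python tuple compares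
-- lexicographically, which is exactly the Lex product order Int ×ₗ String
def pvKey (p : String × Int) : Int ×ₗ String := toLex (-p.2, PySem.Str.lower p.1)

-- body of A's merge loop
def pvStepA (m : PySem.Dict String Int) (p : String × Int) : PySem.Dict String Int :=
  match pvAlias p.1 with
  | none => m                       -- if not canonical: continue
  | some canonical => if m.getD canonical 0 < p.2 then m.insert canonical p.2 else m

def clean_apps (apps : List (String × Int)) : List (List (String × String)) :=
  let d := PySem.Dict.ofList apps
  let merged := d.items.foldl pvStepA PySem.Dict.empty
  let nonZero := merged.items.filter (fun p => decide (0 < p.2))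
  let sortedNZ := PySem.List.sorted nonZero pvKey
  sortedNZ.map (fun p => [("name", p.1), ("value", PySem.Int.toStr p.2)])

-- ===== PORT B =====
-- CANONICAL_KEYS (module constant of B: the inverse canonical → aliases catalogue)
def pvCanonGroups : List (String × List String) := [
  ("ClickHouse", ["clickhouse", "paxclickhouse"]),
  ("FoundationDB", ["foundationdb"]),
  ("Harbor", ["harbor"]),
  ("Kafka", ["kafka"]),
  ("MariaDB", ["mariadb"]),
  ("MongoDB", ["mongodb"]),
  ("NATS", ["nats"]),
  ("OpenBAO", ["openbao"]),
  ("OpenSearch", ["opensearch"]),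
  ("Postgres", ["postgres", "postgresql", "paxpostgres"]),
  ("Qdrant", ["qdrant"]),
  ("RabbitMQ", ["rabbitmq"]),
  ("Redis", ["redis", "paxredis"]),
  ("ClearML", ["clearml"]),
  ("Etcd", ["etcd"]),
  ("Ingress", ["ingress"]),
  ("Monitoring", ["monitoring"]),
  ("Bucket", ["bucket"]),
  ("SeaweedFS", ["seaweedfs"]),
  ("NFS", ["nfs"]),
  ("HTTPCache", ["httpcache"]),
  ("TCPBalancer", ["tcpbalancer"]),
  ("VirtualPrivateCloud", ["virtualprivatecloud", "vpc"]),
  ("VPN", ["vpn"]),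
  ("VMInstance", ["vminstance", "paxvminstance"]),
  ("VMDisk", ["vmdisk"]),
  ("Kubernetes", ["kubernetes"])]

-- _canonical: scan the catalogue for the group whose alias list holds the normalized key
def pvCanonical (raw : String) : Option String :=
  (pvCanonGroups.find? (fun g =>
      g.2.contains (PySem.Str.replace (PySem.Str.replace (PySem.Str.lower raw) "-" "") "_" ""))).map (·.1)

def clean_apps_alt (apps : List (String × Int)) : List (List (String × String)) :=
  let ranked := PySem.List.sorted
    ((PySem.Dict.ofList apps).items.filterMap (fun q =>
      if 0 < q.2 then (pvCanonical q.1).map (fun c => (c, q.2)) else none))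
    (fun p => toLex (-p.2, PySem.Str.lower p.1))
  (ranked.foldl
    (fun st p =>
      if PySem.Set.contains st.2 p.1 then st
      else (st.1 ++ [[("name", p.1), ("value", PySem.Int.toStr p.2)]], PySem.Set.add st.2 p.1))
    ([], PySem.Set.empty)).1

-- ===== PRECONDITION & SPEC =====
def Spec_clean_apps (apps : List (String × Int)) (out : List (List (String × String))) : Prop := out = clean_apps_alt apps
instance (apps : List (String × Int)) (out : List (List (String × String))) : Decidable (Spec_clean_apps apps out) := by unfold Spec_clean_apps; infer_instance

-- ===== CLAIM (what is proved, stated in full; the proofs are below) =====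
def Claim_equal_clean_apps : Prop := ∀ (apps : List (String × Int)), Dom_clean_apps apps → Spec_clean_apps apps (clean_apps apps)

-- ===== LEMMAS AND PROOFS =====

-- counts whose alias is c, seen from A's side
def pvMatch (c : String) (l : List (String × Int)) : List Int :=
  (l.filter (fun p => pvAlias p.1 == some c)).map (·.2)

-- the flattened inverse catalogue IS A's alias table, pair for pair, in order
theorem pvFlatEq :
    pvCanonGroups.flatMap (fun g => g.2.map (fun a => (a, g.1))) = pvAliases.items := by decide

theorem pvKeysNodup : pvAliases.keys.Nodup := by decide

-- B's catalogue scan computes A's dict lookup, for EVERY key string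
theorem pvLookupEq (k : String) :
    (pvCanonGroups.find? (fun g => g.2.contains k)).map (·.1) = pvAliases.get? k := by
  cases hf : pvCanonGroups.find? (fun g => g.2.contains k) with
  | some g =>
    have hgmem : g ∈ pvCanonGroups := List.mem_of_find?_eq_some hf
    have hgk : g.2.contains k = true := by
      have := List.find?_some hf; simpa using this
    have hmemflat : (k, g.1) ∈ pvCanonGroups.flatMap (fun g => g.2.map (fun a => (a, g.1))) :=
      List.mem_flatMap.mpr ⟨g, hgmem, List.mem_map_of_mem (by simpa using hgk)⟩
    rw [pvFlatEq] at hmemflat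
    simpa using (PySem.Dict.get?_of_mem_items pvAliases hmemflat pvKeysNodup).symm
  | none =>
    have hall := List.find?_eq_none.mp hf
    have hnot : k ∉ pvAliases.keys := by
      intro hk
      have hk' : k ∈ pvAliases.items.map Prod.fst := by
        simpa [PySem.Dict.keys] using hk
      obtain ⟨p, hp, hp1⟩ := List.mem_map.mp hk'
      rw [← pvFlatEq] at hp
      obtain ⟨g, hg, hpg⟩ := List.mem_flatMap.mp hp
      obtain ⟨a, ha, hap⟩ := List.mem_map.mp hpg
      have hak : a = k := by rw [← hp1, ← hap]
      have := hall g hg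
      simp [hak ▸ ha] at this
    simp [(PySem.Dict.get?_eq_none_iff_not_mem_keys _ _).mpr hnot]

theorem pvCanonicalEq (raw : String) : pvCanonical raw = pvAlias raw := by
  unfold pvCanonical pvAlias pvNormalize
  exact pvLookupEq _

-- dropping non-positive elements does not change a max-fold from a non-negative start
theorem pvFoldMaxFilter (l : List Int) (a : Int) (ha : 0 ≤ a) :
    l.foldl max a = (l.filter (fun n => decide (0 < n))).foldl max a := by
  induction l generalizing a with
  | nil => rfl
  | cons x t ih =>
    simp only [List.foldl_cons, List.filter_cons]
    by_cases hx : 0 < x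
    · simp [hx, List.foldl_cons, ih (max a x) (le_trans ha (le_max_left _ _))]
    · have : max a x = a := by omega
      simp [hx, this, ih a ha]

-- a fold of max stays below any upper bound of its inputs
theorem pvFoldlMaxLe (L : List Int) (a v : Int) (ha : a ≤ v) (h : ∀ x ∈ L, x ≤ v) :
    L.foldl max a ≤ v := by
  induction L generalizing a with
  | nil => exact ha
  | cons x t ih =>
    simp only [List.foldl_cons]
    refine ih (max a x) ?_ (fun y hy => h y (List.mem_cons_of_mem _ hy))
    have := h x List.mem_cons_self
    omega

-- a member that bounds the list is the running max from 0 (positive case)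
theorem pvFoldMaxEq (L : List Int) (v : Int) (hv : 0 < v) (hm : v ∈ L)
    (hb : ∀ x ∈ L, x ≤ v) : L.foldl max 0 = v := by
  refine le_antisymm (pvFoldlMaxLe L 0 v (by omega) hb) ?_
  exact (PySem.List.le_foldl_max L 0).2 v hm

-- one step of A's merge loop, as a max at the aliased key
theorem pvStepGetD (m : PySem.Dict String Int) (p : String × Int) (c : String) :
    (pvStepA m p).getD c 0 =
      if pvAlias p.1 = some c then max (m.getD c 0) p.2 else m.getD c 0 := by
  unfold pvStepA
  cases h : pvAlias p.1 with
  | none => simp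
  | some c' =>
    by_cases hc : c' = c
    · subst hc
      by_cases hlt : m.getD c' 0 < p.2
      · simp only [hlt, if_pos]
        rw [PySem.Dict.getD_insert, max_def]
        split_ifs with h1 h2
        · rfl
        · omega
        · exact absurd rfl h1
        · exact absurd rfl h1
      · simp only [hlt, if_neg, not_false_iff]
        rw [max_def]
        split_ifs <;> omega
    · have : ¬ (some c' = some c) := by simp [hc]
      simp only [this, if_neg, not_false_iff]
      by_cases hlt : m.getD c' 0 < p.2
      · simp only [hlt, if_pos]
        rw [PySem.Dict.getD_insert]
        split_ifs with h2
        · exact absurd h2.symm hc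
        · rfl
      · simp [hlt]

theorem pvMatchCons (c : String) (p : String × Int) (t : List (String × Int)) :
    pvMatch c (p :: t) =
      (if pvAlias p.1 = some c then [p.2] else []) ++ pvMatch c t := by
  unfold pvMatch
  simp only [List.filter_cons]
  by_cases h : pvAlias p.1 = some c
  · simp [h]
  · simp [h]

-- A's merge loop: value at c is the max-fold of the matching counts
theorem pvMergeGetD (l : List (String × Int)) (m : PySem.Dict String Int) (c : String) :
    (l.foldl pvStepA m).getD c 0 = (pvMatch c l).foldl max (m.getD c 0) := by
  induction l generalizing m with
  | nil => rfl
  | cons p t ih =>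
    simp only [List.foldl_cons]
    rw [ih (pvStepA m p), pvMatchCons, pvStepGetD]
    by_cases h : pvAlias p.1 = some c
    · simp [h]
    · simp [h]

-- one step of A's merge loop: key membership
theorem pvStepContains (m : PySem.Dict String Int) (p : String × Int)
    (hpos : ∀ c, 0 ≤ m.getD c 0) (c : String) :
    (pvStepA m p).contains c = true ↔
      m.contains c = true ∨ (pvAlias p.1 = some c ∧ 0 < p.2) := by
  unfold pvStepA
  cases h : pvAlias p.1 with
  | none => simp
  | some c' =>
    by_cases hlt : m.getD c' 0 < p.2
    · simp only [hlt, if_pos]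
      rw [PySem.Dict.contains_insert]
      constructor
      · intro hb
        rcases Bool.or_eq_true_iff.mp hb with hb | hb
        · refine Or.inr ⟨by rw [beq_iff_eq.mp hb], ?_⟩
          have := hpos c'; omega
        · exact Or.inl hb
      · rintro (hb | ⟨hce, _⟩)
        · simp [hb]
        · simp [(Option.some.inj hce).symm]
    · simp only [hlt, if_neg, not_false_iff]
      constructor
      · exact Or.inl
      · rintro (hb | ⟨hce, hp⟩)
        · exact hb
        · have hc' : c' = c := Option.some.inj hce
          subst hc'
          by_contra hnc
          have h0 : m.getD c' 0 = 0 :=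
            PySem.Dict.getD_of_not_contains m 0 (by simpa using hnc)
          omega

theorem pvStepPos (m : PySem.Dict String Int) (p : String × Int)
    (hpos : ∀ c, 0 ≤ m.getD c 0) : ∀ c, 0 ≤ (pvStepA m p).getD c 0 := by
  intro c
  unfold pvStepA
  cases h : pvAlias p.1 with
  | none => exact hpos c
  | some c' =>
    by_cases hlt : m.getD c' 0 < p.2
    · simp only [hlt, if_pos]
      rw [PySem.Dict.getD_insert]
      split_ifs
      · have := hpos c'; omega
      · exact hpos c
    · simp only [hlt, if_neg, not_false_iff]; exact hpos c

-- A's merge loop: key membership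
theorem pvMergeContains (l : List (String × Int)) (m : PySem.Dict String Int)
    (hpos : ∀ c, 0 ≤ m.getD c 0) (c : String) :
    (l.foldl pvStepA m).contains c = true ↔
      m.contains c = true ∨ ∃ p ∈ l, pvAlias p.1 = some c ∧ 0 < p.2 := by
  induction l generalizing m with
  | nil => simp
  | cons p t ih =>
    simp only [List.foldl_cons]
    rw [ih _ (pvStepPos m p hpos), pvStepContains m p hpos c]
    simp only [List.mem_cons]
    constructor
    · rintro (((hb | hb) | hb))
      · exact Or.inl hb
      · exact Or.inr ⟨p, Or.inl rfl, hb⟩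
      · obtain ⟨q, hq, hq2⟩ := hb
        exact Or.inr ⟨q, Or.inr hq, hq2⟩
    · rintro (hb | ⟨q, (rfl | hq), hq2⟩)
      · exact Or.inl (Or.inl hb)
      · exact Or.inl (Or.inr hq2)
      · exact Or.inr ⟨q, hq, hq2⟩

-- A's merge loop: keys stay Nodup
theorem pvMergeNodup (l : List (String × Int)) (m : PySem.Dict String Int)
    (h : m.keys.Nodup) : (l.foldl pvStepA m).keys.Nodup := by
  induction l generalizing m with
  | nil => exact h
  | cons p t ih =>
    simp only [List.foldl_cons]
    refine ih (pvStepA m p) ?_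
    unfold pvStepA
    cases hA : pvAlias p.1 with
    | none => exact h
    | some c' =>
      by_cases hlt : m.getD c' 0 < p.2
      · simp only [hlt, if_pos]
        exact PySem.Dict.nodup_keys_insert m c' p.2 h
      · simp only [hlt, if_neg, not_false_iff]; exact h

-- B's ranked entries are exactly the positive matching counts, tagged by canonical
theorem pvMemRanked (l : List (String × Int)) (k : String) (v : Int) :
    (k, v) ∈ l.filterMap (fun q => if 0 < q.2 then (pvAlias q.1).map (fun c => (c, q.2)) else none)
      ↔ v ∈ pvMatch k l ∧ 0 < v := by
  constructor
  · intro h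
    obtain ⟨q, hq, hfq⟩ := List.mem_filterMap.mp h
    by_cases hp : 0 < q.2
    · simp only [hp, if_pos] at hfq
      obtain ⟨c, hc, hcv⟩ := Option.map_eq_some_iff.mp hfq
      have h1 : c = k := congrArg Prod.fst hcv
      have h2 : q.2 = v := congrArg Prod.snd hcv
      subst h1
      refine ⟨?_, h2 ▸ hp⟩
      unfold pvMatch
      rw [← h2]
      exact List.mem_map_of_mem (List.mem_filter.mpr ⟨hq, by simp [hc]⟩)
    · simp [hp] at hfq
  · rintro ⟨hm, hv⟩
    unfold pvMatch at hm
    obtain ⟨q, hq, hq2⟩ := List.mem_map.mp hm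
    obtain ⟨hql, hqa⟩ := List.mem_filter.mp hq
    refine List.mem_filterMap.mpr ⟨q, hql, ?_⟩
    have hqpos : (0 : Int) < q.2 := hq2 ▸ hv
    rw [if_pos hqpos, beq_iff_eq.mp hqa]
    simp only [Option.map_some]
    rw [hq2]

-- the first-occurrence filter behind B's seen-set loop
def pvFirst (seen : PySem.Set String) : List (String × Int) → List (String × Int)
  | [] => []
  | p :: t =>
    if PySem.Set.contains seen p.1 then pvFirst seen t
    else p :: pvFirst (PySem.Set.add seen p.1) t

-- B's dedupe fold renders exactly the first-occurrence filter
theorem pvFoldDedup (l : List (String × Int)) (out : List (List (String × String)))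
    (seen : PySem.Set String) :
    (l.foldl
      (fun st p =>
        if PySem.Set.contains st.2 p.1 then st
        else (st.1 ++ [[("name", p.1), ("value", PySem.Int.toStr p.2)]], PySem.Set.add st.2 p.1))
      (out, seen)).1
    = out ++ (pvFirst seen l).map (fun p => [("name", p.1), ("value", PySem.Int.toStr p.2)]) := by
  induction l generalizing out seen with
  | nil => simp [pvFirst]
  | cons p t ih =>
    simp only [List.foldl_cons, pvFirst]
    by_cases h : PySem.Set.contains seen p.1
    · simp only [h, if_pos]
      exact ih out seen
    · simp only [h, if_neg, Bool.false_eq_true, not_false_iff]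
      rw [ih]
      simp

theorem pvFirstSublist (seen : PySem.Set String) (l : List (String × Int)) :
    (pvFirst seen l).Sublist l := by
  induction l generalizing seen with
  | nil => simp [pvFirst]
  | cons p t ih =>
    simp only [pvFirst]
    split
    · exact (ih seen).cons p
    · exact (ih _).cons₂ p

theorem pvFirstNotSeen (seen : PySem.Set String) (l : List (String × Int))
    (q : String × Int) (hq : q ∈ pvFirst seen l) : q.1 ∉ seen := by
  induction l generalizing seen with
  | nil => simp [pvFirst] at hq
  | cons p t ih =>
    simp only [pvFirst] at hq
    split at hq
    · exact ih seen hq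
    · rename_i h
      rcases List.mem_cons.mp hq with rfl | hq'
      · intro hmem
        exact h ((PySem.Set.contains_iff _ _).mpr hmem)
      · intro hmem
        exact ih _ hq' ((PySem.Set.mem_add _ _ _).mpr (Or.inl hmem))

theorem pvFirstExists (seen : PySem.Set String) (l : List (String × Int))
    (k : String) (v : Int) (hl : (k, v) ∈ l) (hs : k ∉ seen) :
    ∃ w, (k, w) ∈ pvFirst seen l := by
  induction l generalizing seen with
  | nil => simp at hl
  | cons p t ih =>
    simp only [pvFirst]
    split
    · rename_i h
      rcases List.mem_cons.mp hl with heq | hl'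
      · exfalso
        have : p.1 ∈ seen := (PySem.Set.contains_iff _ _).mp h
        rw [← heq] at this
        exact hs this
      · exact ih seen hl' hs
    · by_cases hk : k = p.1
      · exact ⟨p.2, by simp [hk]⟩
      · rcases List.mem_cons.mp hl with heq | hl'
        · exact absurd (congrArg Prod.fst heq) hk
        · have hs' : k ∉ PySem.Set.add seen p.1 := by
            intro hmem
            rcases (PySem.Set.mem_add _ _ _).mp hmem with h1 | h1
            · exact hs h1
            · exact hk h1
          obtain ⟨w, hw⟩ := ih _ hl' hs'
          exact ⟨w, List.mem_cons_of_mem _ hw⟩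

-- on a key-sorted list, the kept (first) entry of a canonical dominates every entry of it
theorem pvFirstMax (seen : PySem.Set String) (l : List (String × Int))
    (hs : l.Pairwise (fun a b => pvKey a ≤ pvKey b))
    (q : String × Int) (hq : q ∈ pvFirst seen l)
    (r : String × Int) (hr : r ∈ l) (hfst : r.1 = q.1) : r.2 ≤ q.2 := by
  induction l generalizing seen with
  | nil => simp at hr
  | cons p t ih =>
    have hph : ∀ r ∈ t, pvKey p ≤ pvKey r := fun r hr => List.rel_of_pairwise_cons hs hr
    have hpt := (List.pairwise_cons.mp hs).2
    simp only [pvFirst] at hq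
    split at hq
    · rename_i h
      rcases List.mem_cons.mp hr with rfl | hr'
      · exfalso
        have hseen : q.1 ∉ seen := pvFirstNotSeen seen t q hq
        rw [← hfst] at hseen
        exact hseen ((PySem.Set.contains_iff _ _).mp h)
      · exact ih seen hpt hq hr'
    · rcases List.mem_cons.mp hq with rfl | hq'
      · rcases List.mem_cons.mp hr with rfl | hr'
        · exact le_refl _
        · have hle := hph r hr'
          unfold pvKey at hle
          rcases Prod.Lex.le_iff.mp hle with hlt | ⟨heq, _⟩
          · simp at hlt; omega
          · simp at heq; omega
      · rcases List.mem_cons.mp hr with rfl | hr'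
        · exfalso
          have := pvFirstNotSeen _ t q hq'
          rw [← hfst] at this
          exact this ((PySem.Set.mem_add _ _ _).mpr (Or.inr rfl))
        · exact ih _ hpt hq' hr'

theorem pvFirstFstNodup (seen : PySem.Set String) (l : List (String × Int)) :
    (pvFirst seen l).Pairwise (fun a b => a.1 ≠ b.1) := by
  induction l generalizing seen with
  | nil => simp [pvFirst]
  | cons p t ih =>
    simp only [pvFirst]
    split
    · exact ih seen
    · refine List.pairwise_cons.mpr ⟨?_, ih _⟩
      intro b hb heq
      have := pvFirstNotSeen _ t b hb
      exact this ((PySem.Set.mem_add _ _ _).mpr (Or.inr heq.symm))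

-- lower is injective on the alias catalogue's values
theorem pvLowerInj : ∀ x ∈ pvAliases.values, ∀ y ∈ pvAliases.values,
    PySem.Str.lower x = PySem.Str.lower y → x = y := by decide

-- an aliased name is a catalogue value
theorem pvAliasMemValues {raw c : String} (h : pvAlias raw = some c) :
    c ∈ pvAliases.values := by
  have := PySem.Dict.mem_items_of_get?_eq_some pvAliases h
  exact List.mem_map_of_mem this

theorem clean_apps_eq_alt (apps : List (String × Int)) :
    clean_apps apps = clean_apps_alt apps := by
  simp only [clean_apps, clean_apps_alt]
  -- rewrite B's catalogue scan into A's lookup, and B's inline key into pvKey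
  have hconv : (fun q : String × Int => if 0 < q.2 then (pvCanonical q.1).map (fun c => (c, q.2)) else none)
      = (fun q : String × Int => if 0 < q.2 then (pvAlias q.1).map (fun c => (c, q.2)) else none) := by
    funext q; rw [pvCanonicalEq]
  have hkey : (fun p : String × Int => toLex (-p.2, PySem.Str.lower p.1)) = pvKey := rfl
  rw [hconv, hkey]
  set items := (PySem.Dict.ofList apps).items with hitems
  set merged := items.foldl pvStepA PySem.Dict.empty with hmerged
  have hnodupK : merged.keys.Nodup := pvMergeNodup items _ PySem.Dict.nodup_keys_empty
  have hget : ∀ c, merged.getD c 0 = (pvMatch c items).foldl max 0 := by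
    intro c
    have := pvMergeGetD items PySem.Dict.empty c
    simpa [PySem.Dict.getD_empty] using this
  have hcont : ∀ c, merged.contains c = true ↔ ∃ p ∈ items, pvAlias p.1 = some c ∧ 0 < p.2 := by
    intro c
    have := pvMergeContains items PySem.Dict.empty (by simp [PySem.Dict.getD_empty]) c
    simpa [PySem.Dict.contains_empty] using this
  have hvalpos : ∀ c, merged.contains c = true → 0 < merged.getD c 0 := by
    intro c hc
    obtain ⟨p, hp, hpa, hp2⟩ := (hcont c).mp hc
    have hmem : p.2 ∈ pvMatch c items := by
      unfold pvMatch
      exact List.mem_map_of_mem (List.mem_filter.mpr ⟨hp, by simp [hpa]⟩)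
    have h1 := (PySem.List.le_foldl_max (pvMatch c items) 0).2 p.2 hmem
    have h2 := hget c
    omega
  have hmemItems : ∀ k v, (k, v) ∈ merged.items ↔
      merged.contains k = true ∧ v = merged.getD k 0 := by
    intro k v
    constructor
    · intro h
      refine ⟨(PySem.Dict.contains_iff_mem_keys merged k).mpr
        (PySem.Dict.mem_keys_of_mem_items merged h), ?_⟩
      exact (PySem.Dict.getD_of_mem_items merged h hnodupK 0).symm
    · rintro ⟨hc, rfl⟩
      have hsome : (merged.get? k).isSome := by
        rw [← PySem.Dict.contains_eq_isSome_get?]; exact hc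
      obtain ⟨w, hw⟩ := Option.isSome_iff_exists.mp hsome
      have := PySem.Dict.mem_items_of_get?_eq_some merged hw
      have hgd : merged.getD k 0 = w := by
        rw [PySem.Dict.getD_eq_get?_getD, hw]; rfl
      rw [hgd]; exact this
  have hitemsNodup : merged.items.Nodup := by
    refine List.Nodup.of_map Prod.fst ?_
    have : merged.items.map Prod.fst = merged.keys := rfl
    rw [this]; exact hnodupK
  -- the nonZero filter is the identity on merged.items
  have hfilter : merged.items.filter (fun p => decide (0 < p.2)) = merged.items := by
    rw [List.filter_eq_self]
    rintro ⟨k, v⟩ hkv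
    obtain ⟨hc, rfl⟩ := (hmemItems k v).mp hkv
    simpa using hvalpos k hc
  have hfstVal : ∀ q ∈ merged.items, q.1 ∈ pvAliases.values := by
    rintro ⟨k, v⟩ hkv
    obtain ⟨hc, -⟩ := (hmemItems k v).mp hkv
    obtain ⟨p, _, hpa, _⟩ := (hcont k).mp hc
    exact pvAliasMemValues hpa
  -- A's sorted list zs is strictly increasing under pvKey
  set zs := PySem.List.sorted (merged.items.filter (fun p => decide (0 < p.2))) pvKey with hzs
  have hzs' : zs = PySem.List.sorted merged.items pvKey := by rw [hzs, hfilter]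
  have hzsPerm : zs.Perm merged.items := by
    rw [hzs']; exact PySem.List.sorted_perm merged.items pvKey false
  have hzsLe : zs.Pairwise (fun a b => pvKey a ≤ pvKey b) := by
    rw [hzs']; exact PySem.List.sorted_pairwise merged.items pvKey
  have hzsNe : zs.Pairwise (· ≠ ·) := hzsPerm.nodup_iff.mpr hitemsNodup
  have hzsLt : zs.Pairwise (fun a b => pvKey a < pvKey b) := by
    have hcomb := hzsLe.and hzsNe
    refine hcomb.imp_of_mem ?_
    rintro a b ha hb ⟨hle, hne⟩
    rcases lt_or_eq_of_le hle with h | h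
    · exact h
    · exfalso
      have haV : a.1 ∈ pvAliases.values := hfstVal a (hzsPerm.subset ha)
      have hbV : b.1 ∈ pvAliases.values := hfstVal b (hzsPerm.subset hb)
      simp only [pvKey] at h
      have h' := toLex_inj.mp h
      have hx : -a.2 = -b.2 := congrArg Prod.fst h'
      have hy : PySem.Str.lower a.1 = PySem.Str.lower b.1 := congrArg Prod.snd h'
      have h1 : a.1 = b.1 := pvLowerInj a.1 haV b.1 hbV hy
      have h2 : a.2 = b.2 := by omega
      exact hne (Prod.ext h1 h2)
  -- B's side
  set rankedU := items.filterMap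
    (fun q => if 0 < q.2 then (pvAlias q.1).map (fun c => (c, q.2)) else none) with hrankedU
  set srt := PySem.List.sorted rankedU pvKey with hsrt
  rw [pvFoldDedup]
  set kept := pvFirst PySem.Set.empty srt with hkept
  have hsrtLe : srt.Pairwise (fun a b => pvKey a ≤ pvKey b) :=
    PySem.List.sorted_pairwise rankedU pvKey
  have hmemSrt : ∀ q, q ∈ srt ↔ q ∈ rankedU := by
    intro q; rw [hsrt]; exact PySem.List.mem_sorted rankedU pvKey false q
  -- membership of kept = membership of merged.items
  have hkeptMemFwd : ∀ k v, (k, v) ∈ kept → merged.contains k = true ∧ v = merged.getD k 0 := by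
    intro k v hkv
    have hinS : (k, v) ∈ srt := (pvFirstSublist _ srt).mem hkv
    have hinR : (k, v) ∈ rankedU := (hmemSrt _).mp hinS
    obtain ⟨hmatch, hvpos⟩ := (pvMemRanked items k v).mp hinR
    have hcontk : merged.contains k = true := by
      unfold pvMatch at hmatch
      obtain ⟨p, hp, hp2⟩ := List.mem_map.mp hmatch
      obtain ⟨hpl, hpa⟩ := List.mem_filter.mp hp
      exact (hcont k).mpr ⟨p, hpl, beq_iff_eq.mp hpa, by omega⟩
    refine ⟨hcontk, ?_⟩
    rw [hget k, pvFoldMaxFilter _ _ le_rfl]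
    refine (pvFoldMaxEq _ v hvpos ?_ ?_).symm
    · exact List.mem_filter.mpr ⟨hmatch, by simpa using hvpos⟩
    · intro x hx
      obtain ⟨hxm, hxp⟩ := List.mem_filter.mp hx
      have hxR : (k, x) ∈ rankedU := (pvMemRanked items k x).mpr ⟨hxm, by simpa using hxp⟩
      exact pvFirstMax PySem.Set.empty srt hsrtLe (k, v) hkv (k, x) ((hmemSrt _).mpr hxR) rfl
  have hkeptMem : ∀ k v, (k, v) ∈ kept ↔ (k, v) ∈ merged.items := by
    intro k v
    rw [hmemItems]
    constructor
    · exact hkeptMemFwd k v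
    · rintro ⟨hc, rfl⟩
      obtain ⟨p, hp, hpa, hp2⟩ := (hcont k).mp hc
      have hpR : (k, p.2) ∈ rankedU := by
        refine (pvMemRanked items k p.2).mpr ⟨?_, hp2⟩
        unfold pvMatch
        exact List.mem_map_of_mem (List.mem_filter.mpr ⟨hp, by simp [hpa]⟩)
      obtain ⟨w, hw⟩ := pvFirstExists PySem.Set.empty srt k p.2
        ((hmemSrt _).mpr hpR) (by simp [PySem.Set.empty])
      have := hkeptMemFwd k w hw
      rw [this.2] at hw
      exact hw
  have hkeptNodup : kept.Nodup :=
    (pvFirstFstNodup PySem.Set.empty srt).imp (fun h heq => h (congrArg Prod.fst heq))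
  have hkeptPerm : kept.Perm merged.items := by
    rw [List.perm_ext_iff_of_nodup hkeptNodup hitemsNodup]
    rintro ⟨k, v⟩
    exact hkeptMem k v
  -- kept is strictly increasing under pvKey too
  have hkeptLe : kept.Pairwise (fun a b => pvKey a ≤ pvKey b) :=
    List.Pairwise.sublist (pvFirstSublist _ srt) hsrtLe
  have hkeptLt : kept.Pairwise (fun a b => pvKey a < pvKey b) := by
    have hne := pvFirstFstNodup PySem.Set.empty srt
    have hcomb := hkeptLe.and hne
    refine hcomb.imp_of_mem ?_
    rintro a b ha hb ⟨hle, hne'⟩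
    rcases lt_or_eq_of_le hle with h | h
    · exact h
    · exfalso
      have haV : a.1 ∈ pvAliases.values := hfstVal a (hkeptPerm.subset ha)
      have hbV : b.1 ∈ pvAliases.values := hfstVal b (hkeptPerm.subset hb)
      simp only [pvKey] at h
      have h' := toLex_inj.mp h
      have hy : PySem.Str.lower a.1 = PySem.Str.lower b.1 := congrArg Prod.snd h'
      exact hne' (pvLowerInj a.1 haV b.1 hbV hy)
  -- two strictly key-sorted permutations are equal
  have hkz : kept = zs :=
    (hkeptPerm.trans hzsPerm.symm).eq_of_pairwise
      (fun a b _ _ h1 h2 => absurd h1 (lt_asymm h2)) hkeptLt hzsLt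
  rw [List.nil_append, hkz]

-- ===== VERDICT (by name: the statement is the Claim_ definition above) =====
theorem clean_apps_spec : Claim_equal_clean_apps := by
  intro apps _
  unfold Spec_clean_apps
  exact clean_apps_eq_alt apps
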